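-- pv_equiv track=rewrite | github.com/necoha/whisper-transcriber-mw | backend/gpu_detect.py | classify_gpu
-- ===== SOURCE A (Python) =====
-- def classify_gpu(gpu_name: str) -> str:
--     """Classify GPU type based on name"""
--     name_lower = gpu_name.lower()
--
--     if any(keyword in name_lower for keyword in ["nvidia", "geforce", "rtx", "gtx", "quadro", "tesla"]):
--         return "nvidia"
--     elif any(keyword in name_lower for keyword in ["amd", "radeon", "rx ", "vega", "navi"]):
--         return "amd"
--     elif any(keyword in name_lower for keyword in ["intel", "iris", "uhd", "hd graphics", "xe"]):
--         return "intel"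
--     elif "apple" in name_lower:
--         return "apple"
--     else:
--         return "unknown"
-- ===== SOURCE B (Python) =====
-- # Flat keyword->category map; B first collects ALL matched categories, then picks by priority.
-- KEYWORD_CATEGORY = [
--     ("nvidia", "nvidia"), ("geforce", "nvidia"), ("rtx", "nvidia"),
--     ("gtx", "nvidia"), ("quadro", "nvidia"), ("tesla", "nvidia"),
--     ("amd", "amd"), ("radeon", "amd"), ("rx ", "amd"), ("vega", "amd"), ("navi", "amd"),
--     ("intel", "intel"), ("iris", "intel"), ("uhd", "intel"),
--     ("hd graphics", "intel"), ("xe", "intel"),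
--     ("apple", "apple"),
-- ]
--
-- PRIORITY = ["nvidia", "amd", "intel", "apple"]
--
-- def classify_gpu(gpu_name: str) -> str:
--     """Classify GPU type based on name"""
--     name_lower = gpu_name.lower()
--     matched = [cat for kw, cat in KEYWORD_CATEGORY if kw in name_lower]
--     for cat in PRIORITY:
--         if cat in matched:
--             return cat
--     return "unknown"
-- ===== Notes on version B (the rewrite author's own statement) =====
-- stated objective: alternative
-- what changed: B replaces A's short-circuiting if/elif chain of grouped any() tests with a two-stage algorithm: one full pass over a flat keyword->category map collects every matched category, then a second pass over a priority list selects the winner.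
import Mathlib
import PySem

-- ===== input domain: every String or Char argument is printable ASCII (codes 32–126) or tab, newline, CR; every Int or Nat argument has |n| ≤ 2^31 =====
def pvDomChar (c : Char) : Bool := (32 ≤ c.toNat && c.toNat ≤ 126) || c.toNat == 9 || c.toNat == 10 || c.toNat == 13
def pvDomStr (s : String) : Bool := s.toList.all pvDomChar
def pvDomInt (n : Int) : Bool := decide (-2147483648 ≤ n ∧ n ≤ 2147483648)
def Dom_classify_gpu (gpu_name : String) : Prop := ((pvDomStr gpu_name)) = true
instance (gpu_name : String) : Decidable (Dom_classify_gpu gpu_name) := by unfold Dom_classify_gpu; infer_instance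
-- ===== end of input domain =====

-- B replaces A's short-circuiting if/elif chain with a two-stage algorithm: collect all matched categories from a flat keyword->category map, then select by a priority list (alternative; same cost).


-- ===== PORT A =====
-- A: if/elif chain; each branch is any(keyword in name_lower for keyword in [...])
def classify_gpu (gpu_name : String) : String :=
  let name_lower := PySem.Str.lower gpu_name
  if (["nvidia", "geforce", "rtx", "gtx", "quadro", "tesla"].any
      fun keyword => PySem.Str.isIn keyword name_lower) then "nvidia"
  else if (["amd", "radeon", "rx ", "vega", "navi"].any
      fun keyword => PySem.Str.isIn keyword name_lower) then "amd"
  else if (["intel", "iris", "uhd", "hd graphics", "xe"].any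
      fun keyword => PySem.Str.isIn keyword name_lower) then "intel"
  else if PySem.Str.isIn "apple" name_lower then "apple"
  else "unknown"

-- ===== PORT B =====
-- B stage 1 data: flat keyword -> category map
def keywordCategory : List (String × String) :=
  [("nvidia", "nvidia"), ("geforce", "nvidia"), ("rtx", "nvidia"),
   ("gtx", "nvidia"), ("quadro", "nvidia"), ("tesla", "nvidia"),
   ("amd", "amd"), ("radeon", "amd"), ("rx ", "amd"), ("vega", "amd"), ("navi", "amd"),
   ("intel", "intel"), ("iris", "intel"), ("uhd", "intel"),
   ("hd graphics", "intel"), ("xe", "intel"),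
   ("apple", "apple")]

def priority : List String := ["nvidia", "amd", "intel", "apple"]

-- B stage 2: first priority category occurring in the matched list
def pickFirst (matched : List String) : List String → String
  | [] => "unknown"
  | cat :: rest => if matched.contains cat then cat else pickFirst matched rest

def classify_gpu_alt (gpu_name : String) : String :=
  let name_lower := PySem.Str.lower gpu_name
  let matched := (keywordCategory.filter (fun p => PySem.Str.isIn p.1 name_lower)).map Prod.snd
  pickFirst matched priority

-- ===== PRECONDITION & SPEC =====
def Spec_classify_gpu (gpu_name : String) (out : String) : Prop := out = classify_gpu_alt gpu_name
instance (gpu_name : String) (out : String) : Decidable (Spec_classify_gpu gpu_name out) := by unfold Spec_classify_gpu; infer_instance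

-- ===== CLAIM (what is proved, stated in full; the proofs are below) =====
def Claim_equal_classify_gpu : Prop := ∀ (gpu_name : String), Dom_classify_gpu gpu_name → Spec_classify_gpu gpu_name (classify_gpu gpu_name)

-- ===== LEMMAS AND PROOFS =====

-- ===== VERDICT (by name: the statement is the Claim_ definition above) =====
theorem classify_gpu_spec : Claim_equal_classify_gpu := by
  intro gpu_name _
  unfold Spec_classify_gpu classify_gpu classify_gpu_alt
  set nl := PySem.Str.lower gpu_name with hnl
  simp only [pickFirst, priority, List.contains_iff_mem, keywordCategory]
  simp only [List.any_cons, List.any_nil, Bool.or_eq_true,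
    Bool.or_false]
  by_cases h1 : PySem.Str.isIn "nvidia" nl = true ∨ PySem.Str.isIn "geforce" nl = true ∨
      PySem.Str.isIn "rtx" nl = true ∨ PySem.Str.isIn "gtx" nl = true ∨
      PySem.Str.isIn "quadro" nl = true ∨ PySem.Str.isIn "tesla" nl = true <;>
  by_cases h2 : PySem.Str.isIn "amd" nl = true ∨ PySem.Str.isIn "radeon" nl = true ∨
      PySem.Str.isIn "rx " nl = true ∨ PySem.Str.isIn "vega" nl = true ∨
      PySem.Str.isIn "navi" nl = true <;>
  by_cases h3 : PySem.Str.isIn "intel" nl = true ∨ PySem.Str.isIn "iris" nl = true ∨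
      PySem.Str.isIn "uhd" nl = true ∨ PySem.Str.isIn "hd graphics" nl = true ∨
      PySem.Str.isIn "xe" nl = true <;>
  by_cases h4 : PySem.Str.isIn "apple" nl = true <;>
  · simp_all
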